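-- pv_equiv track=rewrite | github.com/3thanRam/stockbot | financebot/src/trainer.py | get_current_horizon
-- ===== SOURCE A (Python) =====
-- def get_current_horizon(epoch, schedule):
--     """
--     Gets the training horizon (number of steps to predict) based on the
--     curriculum schedule for the given epoch.
--     """
--     current_h = 1 # Initialize with a minimum horizon
--     # Sort the schedule keys (epochs) to ensure we check them in increasing order
--     sorted_epochs = sorted(schedule.keys())
--     # Iterate through the sorted start epochs in the schedule
--     for start_epoch in sorted_epochs:
--         # If the current epoch is greater than or equal to the start epoch in the schedule
--         if epoch >= start_epoch:
--             # Update the current horizon to the value specified for this epoch range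
--             current_h = schedule[start_epoch]
--         else:
--             # If the current epoch is less than the start epoch, we've passed the relevant range
--             # for this epoch, so we can stop checking.
--             break
--     # Return the determined training horizon for the current epoch
--     return current_h
-- ===== SOURCE B (Python) =====
-- def get_current_horizon(epoch, schedule):
--     """
--     Gets the training horizon (number of steps to predict) based on the
--     curriculum schedule for the given epoch.
--     """
--     candidates = [k for k in schedule if epoch >= k]
--     if not candidates:
--         return 1
--     return schedule[max(candidates)]
-- ===== Notes on version B (the rewrite author's own statement) =====
-- stated objective: faster
-- what changed: Replaced sort-then-ordered-scan-with-break by a single filtering pass over the keys plus a max reduction, then one lookup.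
import Mathlib
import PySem

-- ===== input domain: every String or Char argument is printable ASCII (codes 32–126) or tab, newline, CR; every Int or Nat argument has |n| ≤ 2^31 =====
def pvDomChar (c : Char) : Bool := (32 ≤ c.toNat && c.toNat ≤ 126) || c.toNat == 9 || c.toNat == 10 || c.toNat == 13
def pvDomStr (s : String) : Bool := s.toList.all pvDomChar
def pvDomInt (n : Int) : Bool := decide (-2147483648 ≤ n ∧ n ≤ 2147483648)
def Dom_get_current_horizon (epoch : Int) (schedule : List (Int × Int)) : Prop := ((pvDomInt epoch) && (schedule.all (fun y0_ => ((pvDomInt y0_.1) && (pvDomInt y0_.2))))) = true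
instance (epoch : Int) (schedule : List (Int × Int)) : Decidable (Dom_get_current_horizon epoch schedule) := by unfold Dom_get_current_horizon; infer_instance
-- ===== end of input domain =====

-- B drops A's sort-then-scan: it filters the qualifying keys in one pass and looks up their maximum.


-- ===== PORT A =====
-- schedule[k]: first-match association-list lookup (k is always a key when either port uses it,
-- so the .getD 0 default is never reached)
def pvDictGet (schedule : List (Int × Int)) (k : Int) : Int :=
  ((schedule.find? (fun p => p.1 == k)).map (·.2)).getD 0

-- A's loop over the sorted keys, with the 'break' as an early return of cur
def pvLoopA (epoch : Int) (schedule : List (Int × Int)) : List Int → Int → Int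
  | [], cur => cur
  | k :: rest, cur =>
      if epoch ≥ k then pvLoopA epoch schedule rest (pvDictGet schedule k) else cur

def get_current_horizon (epoch : Int) (schedule : List (Int × Int)) : Int :=
  pvLoopA epoch schedule (PySem.List.sorted (schedule.map (·.1)) (fun x => x) false) 1

-- ===== PORT B =====
def get_current_horizon_alt (epoch : Int) (schedule : List (Int × Int)) : Int :=
  let candidates := (schedule.map (·.1)).filter (fun k => decide (epoch ≥ k))
  match PySem.List.max? candidates (fun x => x) with
  | none => 1
  | some m => pvDictGet schedule m

-- ===== PRECONDITION & SPEC =====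
def Spec_get_current_horizon (epoch : Int) (schedule : List (Int × Int)) (out : Int) : Prop := out = get_current_horizon_alt epoch schedule
instance (epoch : Int) (schedule : List (Int × Int)) (out : Int) : Decidable (Spec_get_current_horizon epoch schedule out) := by unfold Spec_get_current_horizon; infer_instance

-- ===== CLAIM (what is proved, stated in full; the proofs are below) =====
def Claim_equal_get_current_horizon : Prop := ∀ (epoch : Int) (schedule : List (Int × Int)), Dom_get_current_horizon epoch schedule → Spec_get_current_horizon epoch schedule (get_current_horizon epoch schedule)

-- ===== LEMMAS AND PROOFS =====

-- On a ≤-sorted key list, A's break-loop visits exactly the qualifying prefix, so it equals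
-- a fold over the filtered keys that keeps only the last lookup.
theorem pvLoopA_eq_foldl_filter (epoch : Int) (schedule : List (Int × Int)) :
    ∀ (l : List Int) (cur : Int), l.Pairwise (· ≤ ·) →
      pvLoopA epoch schedule l cur =
        (l.filter (fun k => decide (epoch ≥ k))).foldl (fun _ k => pvDictGet schedule k) cur := by
  intro l
  induction l with
  | nil => intro cur _; rfl
  | cons k rest ih =>
      intro cur hp
      rw [List.pairwise_cons] at hp
      by_cases h : epoch ≥ k
      · simp [pvLoopA, h, ih _ hp.2]
      · have hrest : rest.filter (fun k => decide (epoch ≥ k)) = [] := by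
          rw [List.filter_eq_nil_iff]
          intro x hx
          simp only [decide_eq_true_eq]
          have := hp.1 x hx
          omega
        simp [pvLoopA, h, hrest]

-- a fold that ignores its accumulator returns f of the last element
theorem pvFoldl_last {f : Int → Int} :
    ∀ (l : List Int) (cur : Int) (h : l ≠ []),
      l.foldl (fun _ k => f k) cur = f (l.getLast h) := by
  intro l
  induction l with
  | nil => intro _ h; exact absurd rfl h
  | cons k rest ih =>
      intro cur h
      cases rest with
      | nil => rfl
      | cons a t => simpa [List.foldl_cons] using ih (f k) (by simp)

-- in a ≤-sorted nonempty list, the last element bounds every element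
theorem pvGetLast_isMax :
    ∀ (l : List Int) (h : l ≠ []), l.Pairwise (· ≤ ·) → ∀ y ∈ l, y ≤ l.getLast h := by
  intro l
  induction l with
  | nil => intro h; exact absurd rfl h
  | cons k rest ih =>
      intro h hp y hy
      rw [List.pairwise_cons] at hp
      cases rest with
      | nil => simp at hy; simp [hy]
      | cons a t =>
          rw [List.getLast_cons (by simp)]
          rcases List.mem_cons.mp hy with rfl | hy'
          · exact le_trans (hp.1 a (by simp)) (ih (by simp) hp.2 a (by simp))
          · exact ih (by simp) hp.2 y hy'

-- ===== VERDICT (by name: the statement is the Claim_ definition above) =====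
theorem get_current_horizon_spec : Claim_equal_get_current_horizon := by
  intro epoch schedule _
  unfold Spec_get_current_horizon get_current_horizon get_current_horizon_alt
  have hperm : (PySem.List.sorted (schedule.map (·.1)) (fun x => x) false).Perm (schedule.map (·.1)) :=
    PySem.List.sorted_perm _ (fun x => x) false
  have hpw : (PySem.List.sorted (schedule.map (·.1)) (fun x => x) false).Pairwise (· ≤ ·) := by
    simpa using PySem.List.sorted_pairwise (schedule.map (·.1)) (fun x => x)
  have hfperm : ((PySem.List.sorted (schedule.map (·.1)) (fun x => x) false).filter
      (fun k => decide (epoch ≥ k))).Perm ((schedule.map (·.1)).filter (fun k => decide (epoch ≥ k))) :=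
    hperm.filter _
  rw [pvLoopA_eq_foldl_filter epoch schedule _ 1 hpw]
  cases hmax : PySem.List.max? ((schedule.map (·.1)).filter (fun k => decide (epoch ≥ k))) (fun x => x) with
  | none =>
      have hnil : (schedule.map (·.1)).filter (fun k => decide (epoch ≥ k)) = [] :=
        (PySem.List.max?_eq_none_iff _ _).mp hmax
      rw [hnil] at hfperm
      simp only [hmax]
      rw [List.perm_nil.mp hfperm]
      rfl
  | some m =>
      have hm_mem : m ∈ (schedule.map (·.1)).filter (fun k => decide (epoch ≥ k)) :=
        PySem.List.max?_mem hmax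
      have hm_max : ∀ y ∈ (schedule.map (·.1)).filter (fun k => decide (epoch ≥ k)), y ≤ m := by
        intro y hy; simpa using PySem.List.max?_isMax hmax y hy
      have hfne : (PySem.List.sorted (schedule.map (·.1)) (fun x => x) false).filter
          (fun k => decide (epoch ≥ k)) ≠ [] := by
        intro hnil
        rw [hnil] at hfperm
        rw [List.nil_perm.mp hfperm] at hm_mem
        exact absurd hm_mem (List.not_mem_nil)
      simp only [hmax]
      rw [pvFoldl_last _ 1 hfne]
      have hlast_mem := List.getLast_mem hfne
      have h1 : ((PySem.List.sorted (schedule.map (·.1)) (fun x => x) false).filter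
          (fun k => decide (epoch ≥ k))).getLast hfne ≤ m :=
        hm_max _ (hfperm.mem_iff.mp hlast_mem)
      have h2 : m ≤ ((PySem.List.sorted (schedule.map (·.1)) (fun x => x) false).filter
          (fun k => decide (epoch ≥ k))).getLast hfne :=
        pvGetLast_isMax _ hfne (hpw.filter _) m (hfperm.mem_iff.mpr hm_mem)
      rw [le_antisymm h1 h2]
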